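-- pv_equiv track=rewrite | github.com/vinceneil666/lora | lora-scanner-release/monitor/lora_monitor.py | hex_pretty
-- ===== SOURCE A (Python) =====
-- def hex_pretty(h):
--     pairs = [h[i:i+2] for i in range(0, len(h), 2)]
--     lines = []
--     for i in range(0, len(pairs), 16):
--         chunk = pairs[i:i+16]
--         hex_part = ' '.join(chunk).ljust(47)
--         raw_bytes = bytes(int(b, 16) for b in chunk)
--         asc_part = ''.join(chr(b) if 32 <= b < 127 else '.' for b in raw_bytes)
--         lines.append(f"             {i:04x}:  {hex_part}  |{asc_part}|")
--     return '\n'.join(lines)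
-- ===== SOURCE B (Python) =====
-- def hex_pretty(h):
--     def fmt(off, hx, vals):
--         asc = ''.join(chr(b) if 32 <= b < 127 else '.' for b in bytes(vals))
--         return f"             {off:04x}:  {' '.join(hx).ljust(47)}  |{asc}|"
--     lines, hx, vals, off = [], [], [], 0
--     for i in range(0, len(h), 2):
--         p = h[i:i+2]
--         hx.append(p)
--         vals.append(int(p, 16))
--         if len(hx) == 16:
--             lines.append(fmt(off, hx, vals))
--             hx, vals, off = [], [], off + 16
--     if hx:
--         lines.append(fmt(off, hx, vals))
--     return '\n'.join(lines)
-- ===== Notes on version B (the rewrite author's own statement) =====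
-- stated objective: alternative
-- what changed: Replaces A's two-phase build-all-pairs-then-regroup-by-16-with-slices with a single streaming pass that accumulates the current row's hex pairs and byte values and flushes a formatted line every 16 pairs (plus a final remainder flush), so no pairs list or row slicing exists.
import Mathlib
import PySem

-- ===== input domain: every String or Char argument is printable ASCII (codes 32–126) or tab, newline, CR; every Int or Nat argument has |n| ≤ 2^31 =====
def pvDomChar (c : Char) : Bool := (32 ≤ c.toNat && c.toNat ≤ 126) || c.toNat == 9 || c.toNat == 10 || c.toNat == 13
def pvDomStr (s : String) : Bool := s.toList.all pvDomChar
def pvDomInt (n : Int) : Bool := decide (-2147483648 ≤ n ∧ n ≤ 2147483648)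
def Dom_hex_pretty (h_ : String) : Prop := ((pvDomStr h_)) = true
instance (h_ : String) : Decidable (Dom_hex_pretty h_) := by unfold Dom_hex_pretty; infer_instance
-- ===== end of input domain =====

-- B replaces A's build-all-pairs-then-regroup-by-16 with one streaming accumulate-and-flush
-- pass (objective: alternative decomposition, same cost).

-- shared formatting primitives (hand ports of str.ljust(47) and f"{i:04x}", exact for the
-- nonnegative offsets they are applied to; both Pythons use these same built-ins)
def pvLjust47 (cs : List Char) : List Char := cs ++ List.replicate (47 - cs.length) ' '
def pvHex4 (i : Int) : List Char :=
  let ds := Nat.toDigits 16 i.toNat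
  List.replicate (4 - ds.length) '0' ++ ds
def pvSpaces13 : List Char := [' ', ' ', ' ', ' ', ' ', ' ', ' ', ' ', ' ', ' ', ' ', ' ', ' ']

-- ===== PORT A =====
def hex_pretty (h_ : String) : String :=
  let l := h_.toList
  -- pairs = [h[i:i+2] for i in range(0, len(h), 2)]
  let pairs : List (List Char) :=
    (PySem.List.pyRange 0 (l.length : Int) 2).map
      (fun i => PySem.List.slice l (some i) (some (i + 2)))
  -- for i in range(0, len(pairs), 16): …
  let lines : List (List Char) :=
    (PySem.List.pyRange 0 (pairs.length : Int) 16).map (fun i =>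
      let chunk := PySem.List.slice pairs (some i) (some (i + 16))
      let hex_part := pvLjust47 (PySem.Chars.join [' '] chunk)
      -- raw_bytes = bytes(int(b, 16) for b in chunk); Pre_ excludes the none / negative cases
      let raw : List Int := chunk.map (fun b => (PySem.Int.ofCharsBase? b 16).getD 0)
      let asc := raw.map (fun b => if 32 ≤ b ∧ b < 127 then Char.ofNat b.toNat else '.')
      pvSpaces13 ++ pvHex4 i ++ [':', ' ', ' '] ++ hex_part ++ [' ', ' ', '|'] ++ asc ++ ['|'])
  String.mk (PySem.Chars.join ['\n'] lines)

-- ===== PORT B =====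
-- fmt(off, hx, vals): bytes(vals) over values 0..255 (Pre_ excludes the rest) is the value
-- list itself, so the ascii column is a map over vals
def pvFmt (off : Int) (hx : List (List Char)) (vals : List Int) : List Char :=
  let asc := vals.map (fun b => if 32 ≤ b ∧ b < 127 then Char.ofNat b.toNat else '.')
  pvSpaces13 ++ pvHex4 off ++ [':', ' ', ' '] ++ pvLjust47 (PySem.Chars.join [' '] hx)
    ++ [' ', ' ', '|'] ++ asc ++ ['|']

def hex_pretty_alt (h_ : String) : String :=
  let l := h_.toList
  -- lines, hx, vals, off = [], [], [], 0;  for i in range(0, len(h), 2): …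
  let s := (PySem.List.pyRange 0 (l.length : Int) 2).foldl
    (fun (s : List (List Char) × List (List Char) × List Int × Int) i =>
      let (lines, hx, vals, off) := s
      let p := PySem.List.slice l (some i) (some (i + 2))
      let hx := hx ++ [p]
      let vals := vals ++ [(PySem.Int.ofCharsBase? p 16).getD 0]
      if hx.length = 16 then (lines ++ [pvFmt off hx vals], [], [], off + 16)
      else (lines, hx, vals, off))
    ([], [], [], 0)
  -- if hx: lines.append(fmt(off, hx, vals))
  let lines := if s.2.1.isEmpty then s.1 else s.1 ++ [pvFmt s.2.2.2 s.2.1 s.2.2.1]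
  String.mk (PySem.Chars.join ['\n'] lines)

-- ===== PRECONDITION & SPEC =====
-- used only by Pre_ (never by the ports): the 2-char groups of a list
def pvGroups2 : List Char → List (List Char)
  | a :: b :: rest => [a, b] :: pvGroups2 rest
  | [a] => [[a]]
  | [] => []

-- Pre_ excludes exactly the inputs on which A raises ValueError (a 2-char group that
-- int(b, 16) rejects, or one parsing negative, which bytes() rejects); B raises there too.
def Pre_hex_pretty (h_ : String) : Prop :=
  (pvGroups2 h_.toList).all
    (fun p => match PySem.Int.ofCharsBase? p 16 with
              | some v => decide (0 ≤ v)
              | none => false) = true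
instance (h_ : String) : Decidable (Pre_hex_pretty h_) := by unfold Pre_hex_pretty; infer_instance
def pvWitness_hex_pretty : String := "48656c6c6f"

def Spec_hex_pretty (h_ : String) (out : String) : Prop := out = hex_pretty_alt h_
instance (h_ : String) (out : String) : Decidable (Spec_hex_pretty h_ out) := by unfold Spec_hex_pretty; infer_instance

-- ===== CLAIM (what is proved, stated in full; the proofs are below) =====
def Claim_equal_hex_pretty : Prop := ∀ (h_ : String), Dom_hex_pretty h_ → Pre_hex_pretty h_ → Spec_hex_pretty h_ (hex_pretty h_)

-- ===== LEMMAS AND PROOFS =====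

theorem pv_count (n k : Nat) (hk : 0 < k) :
    (if (0:Int) < (n:Int) then (((n:Int) - 0 + k - 1) / k).toNat else 0) = (n + k - 1)/k := by
  split_ifs with h
  · have : ((n:Int) - 0 + k - 1) = ((n + k - 1 : Nat) : Int) := by omega
    rw [this, ← Int.natCast_div, Int.toNat_natCast]
  · have hn : n = 0 := by omega
    subst hn
    simp
    exact (Nat.div_eq_of_lt (by omega)).symm

-- a map of f over range(0, len(xs), k) of k-wide slices is a map over the chunk indices
theorem pv_range_slice {α β : Type} (k : Nat) (hk : 0 < k) (xs : List α) (f : Int → List α → β) :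
    (PySem.List.pyRange 0 (xs.length : Int) (k : Int)).map
      (fun i => f i (PySem.List.slice xs (some i) (some (i + k))))
    = (List.range ((xs.length + k - 1)/k)).map
        (fun j => f ((k * j : Nat) : Int) ((xs.drop (k*j)).take k)) := by
  rw [PySem.List.pyRange_of_pos 0 (xs.length : Int) (by exact_mod_cast hk)]
  rw [pv_count xs.length k hk, List.map_map]
  refine List.map_congr_left (fun j hj => ?_)
  have h1 : (0 + (k:Int) * j) = ((k*j:Nat):Int) := by push_cast; ring
  simp only [Function.comp, h1]
  rw [show ((k*j:Nat):Int) + (k:Int) = ((k*j + k : Nat):Int) by push_cast; ring]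
  rw [PySem.List.slice_natCast]
  rw [Nat.add_sub_cancel_left]

-- named subterms of the two ports
def pvPairs (l : List Char) : List (List Char) :=
  (PySem.List.pyRange 0 (l.length : Int) 2).map
    (fun i => PySem.List.slice l (some i) (some (i + 2)))

def pvParse (p : List Char) : Int := (PySem.Int.ofCharsBase? p 16).getD 0
def pvVals (hx : List (List Char)) : List Int := hx.map pvParse

def pvLineA (off : Int) (chunk : List (List Char)) : List Char :=
  pvSpaces13 ++ pvHex4 off ++ [':', ' ', ' ']
    ++ pvLjust47 (PySem.Chars.join [' '] chunk) ++ [' ', ' ', '|']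
    ++ ((chunk.map (fun b => (PySem.Int.ofCharsBase? b 16).getD 0)).map
          (fun b => if 32 ≤ b ∧ b < 127 then Char.ofNat b.toNat else '.')) ++ ['|']

def pvStep (s : List (List Char) × List (List Char) × List Int × Int) (p : List Char) :
    List (List Char) × List (List Char) × List Int × Int :=
  let (lines, hx, vals, off) := s
  let hx := hx ++ [p]
  let vals := vals ++ [pvParse p]
  if hx.length = 16 then (lines ++ [pvFmt off hx vals], [], [], off + 16)
  else (lines, hx, vals, off)

def pvFinish (s : List (List Char) × List (List Char) × List Int × Int) : List (List Char) :=
  if s.2.1.isEmpty then s.1 else s.1 ++ [pvFmt s.2.2.2 s.2.1 s.2.2.1]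

theorem pvA_eq (h : String) :
    hex_pretty h = String.mk (PySem.Chars.join ['\n']
      ((PySem.List.pyRange 0 ((pvPairs h.toList).length : Int) 16).map
        (fun i => pvLineA i (PySem.List.slice (pvPairs h.toList) (some i) (some (i + 16)))))) := rfl

theorem pvB_eq (h : String) :
    hex_pretty_alt h = String.mk (PySem.Chars.join ['\n']
      (pvFinish (List.foldl pvStep ([], [], [], 0) (pvPairs h.toList)))) := by
  unfold hex_pretty_alt pvPairs pvFinish
  rw [List.foldl_map]
  congr 2

theorem pvLineA_fmt (off : Int) (c : List (List Char)) :
    pvLineA off c = pvFmt off c (pvVals c) := by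
  simp [pvLineA, pvFmt, pvVals, pvParse, List.map_map, Function.comp]

theorem pv_run (ps : List (List Char)) : ∀ (L H : List (List Char)) (off : Int),
    H.length + ps.length < 16 →
    List.foldl pvStep (L, H, pvVals H, off) ps = (L, H ++ ps, pvVals (H ++ ps), off) := by
  induction ps with
  | nil => intro L H off h; simp
  | cons p rest ih =>
    intro L H off h
    simp only [List.foldl_cons]
    have h15 : ¬ (H.length = 15) := by simp at h; omega
    have hstep : pvStep (L, H, pvVals H, off) p = (L, H ++ [p], pvVals (H ++ [p]), off) := by
      simp [pvStep, pvVals, h15]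
    rw [hstep]
    have := ih L (H ++ [p]) off (by simp at h ⊢; omega)
    simpa [List.append_assoc] using this

theorem pv_run16 (ps : List (List Char)) : ∀ (L H : List (List Char)) (off : Int),
    ps ≠ [] → H.length + ps.length = 16 →
    List.foldl pvStep (L, H, pvVals H, off) ps
      = (L ++ [pvFmt off (H ++ ps) (pvVals (H ++ ps))], [], [], off + 16) := by
  induction ps with
  | nil => intro L H off hne _; exact absurd rfl hne
  | cons p rest ih =>
    intro L H off _ hlen
    simp only [List.foldl_cons]
    by_cases hr : rest = []
    · subst hr
      have h15 : H.length = 15 := by simp at hlen; omega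
      simp [pvStep, pvVals, h15]
    · have hrl : 0 < rest.length := List.length_pos_iff.mpr hr
      have h15 : ¬ (H.length = 15) := by simp at hlen; omega
      have hstep : pvStep (L, H, pvVals H, off) p = (L, H ++ [p], pvVals (H ++ [p]), off) := by
        simp [pvStep, pvVals, h15]
      rw [hstep]
      have := ih L (H ++ [p]) off hr (by simp at hlen ⊢; omega)
      simpa [List.append_assoc] using this

-- the streaming fold + final flush produce exactly the 16-wide chunk lines
theorem pv_chunks (n : Nat) : ∀ (ps : List (List Char)), ps.length ≤ n →
    ∀ (L : List (List Char)) (off : Int),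
    pvFinish (List.foldl pvStep (L, [], [], off) ps)
      = L ++ (List.range ((ps.length + 15)/16)).map
          (fun (r : Nat) => pvFmt (off + 16*(r:Int)) ((ps.drop (16*r)).take 16)
                          (pvVals ((ps.drop (16*r)).take 16))) := by
  induction n with
  | zero =>
    intro ps h L off
    have : ps = [] := List.length_eq_zero_iff.mp (Nat.le_zero.mp h)
    simp [this, pvFinish]
  | succ n ih =>
    intro ps hlen L off
    by_cases h0 : ps = []
    · simp [h0, pvFinish]
    by_cases h16 : ps.length < 16
    · have hrun := pv_run ps L [] off (by simpa using h16)
      simp only [pvVals, List.map_nil, List.nil_append] at hrun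
      rw [hrun]
      have hpos : 0 < ps.length := List.length_pos_iff.mpr h0
      have hc : (ps.length + 15)/16 = 1 := by omega
      have ht : ps.take 16 = ps := List.take_of_length_le (by omega)
      simp [pvFinish, h0, hc, ht, pvVals]
      rw [List.take_of_length_le (by simp; omega)]
    · rw [Nat.not_lt] at h16
      have h1 : List.foldl pvStep (L, [], [], off) ps
          = List.foldl pvStep (List.foldl pvStep (L, [], [], off) (ps.take 16)) (ps.drop 16) := by
        rw [← List.foldl_append, List.take_append_drop]
      have hlt : (ps.take 16).length = 16 := by simp; omega
      have h2 := pv_run16 (ps.take 16) L [] off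
        (by intro hc; rw [hc] at hlt; simp at hlt) (by simp at hlt ⊢; omega)
      simp only [pvVals, List.map_nil, List.nil_append] at h2
      rw [h1, h2]
      have h3 := ih (ps.drop 16) (by simp; omega) (L ++ [pvFmt off (ps.take 16) (List.map pvParse (ps.take 16))]) (off + 16)
      rw [h3]
      have hc : (ps.length + 15)/16 = ((ps.drop 16).length + 15)/16 + 1 := by simp; omega
      rw [hc, List.range_succ_eq_map, List.map_cons, List.map_map,
          List.append_assoc, List.singleton_append]
      congr 1
      congr 1
      · simp [pvVals]
      refine List.map_congr_left (fun r _ => ?_)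
      simp only [Function.comp]
      have e1 : off + 16*((r+1 : Nat):Int) = off + 16 + 16*(r:Int) := by push_cast; ring
      have e2 : (ps.drop (16*(r+1))).take 16 = ((ps.drop 16).drop (16*r)).take 16 := by
        rw [List.drop_drop]
        congr 2
        omega
      rw [show ((r:Nat) + 1 : Nat) = r + 1 from rfl] at e1
      rw [e1, e2, pvVals]

theorem pv_main (h : String) : hex_pretty h = hex_pretty_alt h := by
  rw [pvA_eq, pvB_eq]
  apply congrArg String.mk
  apply congrArg (PySem.Chars.join ['\n'])
  have hA := pv_range_slice 16 (by norm_num) (pvPairs h.toList) pvLineA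
  simp only [Nat.cast_ofNat] at hA
  rw [hA, pv_chunks (pvPairs h.toList).length (pvPairs h.toList) le_rfl [] 0, List.nil_append]
  refine List.map_congr_left (fun r _ => ?_)
  rw [pvLineA_fmt]
  have e1 : ((16 * r : Nat):Int) = (0:Int) + 16*(r:Int) := by push_cast; ring
  rw [e1]

-- ===== VERDICT (by name: the statement is the Claim_ definition above) =====
theorem hex_pretty_spec : Claim_equal_hex_pretty := by
  intro h _ _
  unfold Spec_hex_pretty
  exact pv_main h
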